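-- pv_equiv track=rewrite | github.com/Xaan1506/ai-agent | agent.py | extract_target_name
-- ===== SOURCE A (Python) =====
-- def extract_target_name(user_input):
--     """Pure Python name extraction - NO LLM needed."""
--     clean = user_input.strip()
--
--     # Remove common prefixes
--     prefixes = [
--         "tell me about", "who is", "research", "search for", "look up",
--         "find info on", "find information on", "give me info on",
--         "i want to know about", "can you research", "please research",
--         "search", "find", "about", "look into",
--     ]
--     lower = clean.lower()
--     for prefix in sorted(prefixes, key=len, reverse=True):
--         if lower.startswith(prefix):
--             clean = clean[len(prefix):].strip()
--             lower = clean.lower()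
--             break
--
--     # Remove trailing punctuation
--     clean = clean.rstrip("?!.,")
--
--     return clean.strip()
-- ===== SOURCE B (Python) =====
-- def extract_target_name(user_input):
--     """Pure Python name extraction - NO LLM needed."""
--     clean = user_input.strip()
--
--     prefixes = {
--         "tell me about", "who is", "research", "search for", "look up",
--         "find info on", "find information on", "give me info on",
--         "i want to know about", "can you research", "please research",
--         "search", "find", "about", "look into",
--     }
--     lower = clean.lower()
--     maxlen = max(len(p) for p in prefixes)
--     # Scan candidate cut lengths from longest to shortest; one hash lookup per
--     # length decides whether the head of the input is a known prefix.
--     for L in range(min(len(lower), maxlen), 0, -1):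
--         if lower[:L] in prefixes:
--             clean = clean[L:].strip()
--             break
--
--     return clean.rstrip("?!.,").strip()
-- ===== Notes on version B (the rewrite author's own statement) =====
-- stated objective: alternative
-- what changed: Instead of sorting the prefix list by length and scanning it with startswith until the first match, B stores the prefixes in a hash set and counts candidate cut lengths down from min(len(input), max prefix length), testing whether the input's head of each length is a member of the set; the first hit is stripped.
import Mathlib
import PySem

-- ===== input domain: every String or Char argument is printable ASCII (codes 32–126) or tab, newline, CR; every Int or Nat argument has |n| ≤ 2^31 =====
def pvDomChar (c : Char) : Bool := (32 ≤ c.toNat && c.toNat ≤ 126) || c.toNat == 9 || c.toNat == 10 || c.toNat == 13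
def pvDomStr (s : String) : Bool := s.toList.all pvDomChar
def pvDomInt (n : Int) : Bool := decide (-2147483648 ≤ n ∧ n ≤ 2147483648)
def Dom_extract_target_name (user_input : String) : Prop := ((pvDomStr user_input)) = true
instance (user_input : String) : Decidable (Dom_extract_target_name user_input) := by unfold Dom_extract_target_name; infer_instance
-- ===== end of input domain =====

-- B replaces A's scan over the sorted prefix list by a countdown over candidate cut
-- lengths with one set-membership test per length (objective: alternative).

-- the literal prefix collection both Pythons contain (A: list, B: set literal of the same strings)
def pvPrefixes : List String :=
  ["tell me about", "who is", "research", "search for", "look up",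
   "find info on", "find information on", "give me info on",
   "i want to know about", "can you research", "please research",
   "search", "find", "about", "look into"]

-- exact port of Python's s.rstrip(chars): drop trailing characters that occur in chars
def pvRstrip (s chars : String) : String :=
  String.ofList ((s.toList.reverse.dropWhile (fun c => chars.toList.contains c)).reverse)

-- ===== PORT A =====
-- the for-loop with break: try each prefix in the sorted order, stop at the first match
def pvLoopA : List String → String → String → String
  | [], clean, _ => clean
  | p :: rest, clean, lower =>
    if PySem.Str.startswith lower p then
      PySem.Str.strip (PySem.Str.slice clean (some (PySem.Str.len p)) none)
    else pvLoopA rest clean lower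

def extract_target_name (user_input : String) : String :=
  let clean := PySem.Str.strip user_input
  let lower := PySem.Str.lower clean
  let clean :=
    pvLoopA (PySem.List.sorted pvPrefixes (fun p => PySem.Str.len p) true) clean lower
  let clean := pvRstrip clean "?!.,"
  PySem.Str.strip clean

-- ===== PORT B =====
-- Python B's set literal of prefixes
def pvPset : PySem.Set String := PySem.Set.ofList pvPrefixes

-- the for-loop `for L in range(n, 0, -1): if lower[:L] in prefixes: …; break`
def pvLoopB : Nat → String → String → String
  | 0, clean, _ => clean
  | Nat.succ L, clean, lower =>
    if PySem.Set.contains pvPset (PySem.Str.slice lower none (some ((L + 1 : Nat) : Int))) then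
      PySem.Str.strip (PySem.Str.slice clean (some ((L + 1 : Nat) : Int)) none)
    else pvLoopB L clean lower

def extract_target_name_alt (user_input : String) : String :=
  let clean := PySem.Str.strip user_input
  let lower := PySem.Str.lower clean
  let maxlen := PySem.List.maxD (pvPset.map (fun p => PySem.Str.len p)) (fun x => x) 0
  let clean := pvLoopB (min (PySem.Str.len lower) maxlen).toNat clean lower
  PySem.Str.strip (pvRstrip clean "?!.,")

-- ===== PRECONDITION & SPEC =====
def Spec_extract_target_name (user_input : String) (out : String) : Prop := out = extract_target_name_alt user_input
instance (user_input : String) (out : String) : Decidable (Spec_extract_target_name user_input out) := by unfold Spec_extract_target_name; infer_instance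

-- ===== CLAIM (what is proved, stated in full; the proofs are below) =====
def Claim_equal_extract_target_name : Prop := ∀ (user_input : String), Dom_extract_target_name user_input → Spec_extract_target_name user_input (extract_target_name user_input)

-- ===== LEMMAS AND PROOFS =====

-- A's loop is: find the first prefix (in the given order) that matches, strip it; else keep clean
theorem pvLoopA_eq_find (S : List String) (clean lower : String) :
    pvLoopA S clean lower =
      match S.find? (fun p => PySem.Str.startswith lower p) with
      | none => clean
      | some p => PySem.Str.strip (PySem.Str.slice clean (some (PySem.Str.len p)) none) := by
  induction S with
  | nil => rfl
  | cons p rest ih =>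
    by_cases h : PySem.Str.startswith lower p = true
    · rw [pvLoopA, if_pos h, List.find?_cons_of_pos h]
    · rw [pvLoopA, if_neg h, List.find?_cons_of_neg (by simpa using h), ih]

-- in a list sorted by key descending, the first element passing pred has maximal key among passers
theorem find_desc_max {α : Type} (key : α → Int) (pred : α → Bool) (S : List α)
    (hp : S.Pairwise (fun a b => key b ≤ key a)) (p : α)
    (hf : S.find? pred = some p) : ∀ q ∈ S, pred q = true → key q ≤ key p := by
  induction S with
  | nil => simp at hf
  | cons a rest ih =>
    rw [List.pairwise_cons] at hp
    by_cases ha : pred a = true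
    · rw [List.find?_cons_of_pos ha] at hf
      cases hf
      intro q hq _
      rcases List.mem_cons.mp hq with rfl | hq
      · exact le_refl _
      · exact hp.1 q hq
    · rw [List.find?_cons_of_neg (by simpa using ha)] at hf
      intro q hq hpq
      rcases List.mem_cons.mp hq with rfl | hq
      · exact absurd hpq ha
      · exact ih hp.2 hf q hq hpq

-- A: first match in the length-descending sort strips the length of the LONGEST match
theorem pvLoopA_eq_filter (clean lower : String) :
    pvLoopA (PySem.List.sorted pvPrefixes (fun p => PySem.Str.len p) true) clean lower =
      (if (pvPrefixes.filter (fun p => PySem.Str.startswith lower p)).isEmpty then clean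
       else
         PySem.Str.strip (PySem.Str.slice clean
           (some (PySem.Str.len (PySem.List.maxD
             (pvPrefixes.filter (fun p => PySem.Str.startswith lower p))
             (fun p => PySem.Str.len p) ""))) none)) := by
  rw [pvLoopA_eq_find]
  set pred : String → Bool := fun p => PySem.Str.startswith lower p with hpred
  set key : String → Int := fun p => PySem.Str.len p with hkey
  set S := PySem.List.sorted pvPrefixes key true with hS
  set M := pvPrefixes.filter pred with hM
  have hperm : S.Perm pvPrefixes := PySem.List.sorted_perm pvPrefixes key true
  have hpw : S.Pairwise (fun a b => key b ≤ key a) :=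
    PySem.List.sorted_pairwise_rev pvPrefixes key
  cases hfind : S.find? pred with
  | none =>
    have hMnil : M = [] := by
      rw [hM, List.filter_eq_nil_iff]
      intro q hq
      simpa using List.find?_eq_none.mp hfind q (hperm.mem_iff.mpr hq)
    simp [hMnil]
  | some p =>
    have hpM : p ∈ M := by
      rw [hM, List.mem_filter]
      exact ⟨hperm.mem_iff.mp (List.mem_of_find?_eq_some hfind), List.find?_some hfind⟩
    have hMne : M ≠ [] := fun h => by simp [h] at hpM
    obtain ⟨m, hm⟩ : ∃ m, PySem.List.max? M key = some m := by
      cases hm : PySem.List.max? M key with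
      | none => exact absurd ((PySem.List.max?_eq_none_iff M key).mp hm) hMne
      | some m => exact ⟨m, rfl⟩
    have hmM := PySem.List.max?_mem hm
    have h1 : key p ≤ key m := PySem.List.max?_isMax hm p hpM
    have h2 : key m ≤ key p :=
      find_desc_max key pred S hpw p hfind m
        (hperm.mem_iff.mpr (List.mem_filter.mp hmM).1) (List.mem_filter.mp hmM).2
    have hne : M.isEmpty = false := by simpa [List.isEmpty_iff] using hMne
    have hMD : PySem.List.maxD M key "" = m := by simp [PySem.List.maxD, hm]
    simp only [hne, Bool.false_eq_true, if_false, hMD]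
    rw [show PySem.Str.len m = key m from rfl, le_antisymm h2 h1]

-- membership of lower[:L] in the prefix set names exactly the matching prefixes of length L
theorem pv_memb_iff (lower : String) (L : Nat) (hL : L ≤ lower.toList.length) :
    PySem.Set.contains pvPset (PySem.Str.slice lower none (some ((L : Nat) : Int))) = true ↔
      ∃ p ∈ pvPrefixes, PySem.Str.startswith lower p = true ∧ p.toList.length = L := by
  have hsl : (PySem.Str.slice lower none (some ((L : Nat) : Int))).toList = lower.toList.take L := by
    simp [PySem.Str.slice, PySem.List.slice_to_natCast]
  rw [PySem.Set.contains_iff, pvPset, PySem.Set.mem_ofList]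
  constructor
  · intro h
    refine ⟨_, h, ?_, ?_⟩
    · simp [PySem.Str.startswith_eq, PySem.Chars.startswith_iff, hsl]
      exact List.take_prefix _ _
    · rw [hsl, List.length_take]; omega
  · rintro ⟨p, hp, hsw, hlen⟩
    have hpre : p.toList <+: lower.toList := by
      simpa [PySem.Str.startswith_eq, PySem.Chars.startswith_iff] using hsw
    have : p.toList = lower.toList.take L := by
      rw [← hlen]; exact List.prefix_iff_eq_take.mp hpre
    have hpe : PySem.Str.slice lower none (some ((L : Nat) : Int)) = p :=
      String.toList_inj.mp (by rw [hsl, this])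
    rwa [hpe]

-- if no candidate length in 1..n is in the set, B's loop returns clean unchanged
theorem pvLoopB_none (clean lower : String) (n : Nat)
    (h : ∀ L, 1 ≤ L → L ≤ n →
      PySem.Set.contains pvPset (PySem.Str.slice lower none (some ((L : Nat) : Int))) = false) :
    pvLoopB n clean lower = clean := by
  induction n with
  | zero => rfl
  | succ k ih =>
    rw [pvLoopB, h (k + 1) (by omega) (by omega)]
    simp only [Bool.false_eq_true, if_false]
    exact ih (fun L h1 h2 => h L h1 (by omega))

-- if L0 is in the set and every larger candidate up to n is not, B's loop strips at L0
theorem pvLoopB_hit (clean lower : String) (n L0 : Nat) (h1 : 1 ≤ L0) (h2 : L0 ≤ n)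
    (hmem : PySem.Set.contains pvPset (PySem.Str.slice lower none (some ((L0 : Nat) : Int))) = true)
    (habove : ∀ L, L0 < L → L ≤ n →
      PySem.Set.contains pvPset (PySem.Str.slice lower none (some ((L : Nat) : Int))) = false) :
    pvLoopB n clean lower =
      PySem.Str.strip (PySem.Str.slice clean (some ((L0 : Nat) : Int)) none) := by
  induction n with
  | zero => omega
  | succ k ih =>
    by_cases hk : L0 = k + 1
    · subst hk; rw [pvLoopB, hmem]; simp
    · rw [pvLoopB, habove (k + 1) (by omega) (by omega)]
      simp only [Bool.false_eq_true, if_false]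
      exact ih (by omega) (fun L a b => habove L a (by omega))

-- B: the countdown with set lookups also strips the length of the longest match
theorem pvLoopB_eq_filter (clean lower : String) :
    pvLoopB (min lower.toList.length 20) clean lower =
      (if (pvPrefixes.filter (fun p => PySem.Str.startswith lower p)).isEmpty then clean
       else
         PySem.Str.strip (PySem.Str.slice clean
           (some (PySem.Str.len (PySem.List.maxD
             (pvPrefixes.filter (fun p => PySem.Str.startswith lower p))
             (fun p => PySem.Str.len p) ""))) none)) := by
  set pred : String → Bool := fun p => PySem.Str.startswith lower p with hpred
  set M := pvPrefixes.filter pred with hM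
  have hlens : ∀ p ∈ pvPrefixes, 1 ≤ p.toList.length ∧ p.toList.length ≤ 20 := by decide
  have hswlen : ∀ p, PySem.Str.startswith lower p = true → p.toList.length ≤ lower.toList.length := by
    intro p hp
    have h : p.toList <+: lower.toList := by
      simpa [PySem.Str.startswith_eq, PySem.Chars.startswith_iff] using hp
    exact h.length_le
  by_cases hMnil : M = []
  · have hall : ∀ L, 1 ≤ L → L ≤ min lower.toList.length 20 →
        PySem.Set.contains pvPset (PySem.Str.slice lower none (some ((L : Nat) : Int))) = false := by
      intro L h1 h2
      by_contra hc
      have hc' : PySem.Set.contains pvPset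
          (PySem.Str.slice lower none (some ((L : Nat) : Int))) = true := by
        revert hc; cases PySem.Set.contains pvPset
          (PySem.Str.slice lower none (some ((L : Nat) : Int))) <;> simp
      obtain ⟨p, hp, hsw, -⟩ :=
        (pv_memb_iff lower L (le_trans h2 (Nat.min_le_left _ _))).mp hc'
      have : p ∈ M := by rw [hM, List.mem_filter]; exact ⟨hp, hsw⟩
      simp [hMnil] at this
    rw [pvLoopB_none _ _ _ hall, hMnil]
    simp
  · obtain ⟨m, hm⟩ : ∃ m, PySem.List.max? M (fun p => PySem.Str.len p) = some m := by
      cases hmm : PySem.List.max? M (fun p => PySem.Str.len p) with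
      | none => exact absurd ((PySem.List.max?_eq_none_iff M _).mp hmm) hMnil
      | some m => exact ⟨m, rfl⟩
    have hmM := PySem.List.max?_mem hm
    obtain ⟨hmPre, hmSw⟩ := List.mem_filter.mp hmM
    have h1 : 1 ≤ m.toList.length := (hlens m hmPre).1
    have h20 : m.toList.length ≤ 20 := (hlens m hmPre).2
    have hlow : m.toList.length ≤ lower.toList.length := hswlen m hmSw
    have hmin : m.toList.length ≤ min lower.toList.length 20 := le_min hlow h20
    have hmem : PySem.Set.contains pvPset
        (PySem.Str.slice lower none (some ((m.toList.length : Nat) : Int))) = true :=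
      (pv_memb_iff lower m.toList.length hlow).mpr ⟨m, hmPre, hmSw, rfl⟩
    have habove : ∀ L, m.toList.length < L → L ≤ min lower.toList.length 20 →
        PySem.Set.contains pvPset (PySem.Str.slice lower none (some ((L : Nat) : Int))) = false := by
      intro L hgt hle
      by_contra hc
      have hc' : PySem.Set.contains pvPset
          (PySem.Str.slice lower none (some ((L : Nat) : Int))) = true := by
        revert hc; cases PySem.Set.contains pvPset
          (PySem.Str.slice lower none (some ((L : Nat) : Int))) <;> simp
      obtain ⟨p, hp, hsw, hplen⟩ :=
        (pv_memb_iff lower L (le_trans hle (Nat.min_le_left _ _))).mp hc'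
      have hpM : p ∈ M := by rw [hM, List.mem_filter]; exact ⟨hp, hsw⟩
      have hle' : PySem.Str.len p ≤ PySem.Str.len m := PySem.List.max?_isMax hm p hpM
      have e1 : PySem.Str.len p = (p.toList.length : Int) := by simp [PySem.Str.len]
      have e2 : PySem.Str.len m = (m.toList.length : Int) := by simp [PySem.Str.len]
      rw [e1, e2] at hle'
      omega
    rw [pvLoopB_hit clean lower _ m.toList.length h1 hmin hmem habove]
    have hne : M.isEmpty = false := by simpa [List.isEmpty_iff] using hMnil
    have hMD : PySem.List.maxD M (fun p => PySem.Str.len p) "" = m := by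
      simp only [PySem.List.maxD, hm, Option.getD_some]
    simp only [hne, Bool.false_eq_true, if_false, hMD]
    have : PySem.Str.len m = ((m.toList.length : Nat) : Int) := by simp [PySem.Str.len]
    rw [this]

-- the two middles agree (and B's computed bound min(len(lower), maxlen) is min(|lower|, 20))
theorem pv_middle_eq (clean lower : String) :
    pvLoopA (PySem.List.sorted pvPrefixes (fun p => PySem.Str.len p) true) clean lower =
      pvLoopB (min (PySem.Str.len lower)
        (PySem.List.maxD (pvPset.map (fun p => PySem.Str.len p)) (fun x => x) 0)).toNat
        clean lower := by
  have hmax : PySem.List.maxD (pvPset.map (fun p => PySem.Str.len p)) (fun x => x) 0 = 20 := by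
    decide
  have hlen : PySem.Str.len lower = (lower.toList.length : Int) := by simp [PySem.Str.len]
  have hc : (min (PySem.Str.len lower)
      (PySem.List.maxD (pvPset.map (fun p => PySem.Str.len p)) (fun x => x) 0)).toNat =
      min lower.toList.length 20 := by rw [hmax, hlen]; omega
  rw [hc, pvLoopA_eq_filter, pvLoopB_eq_filter]

-- ===== VERDICT (by name: the statement is the Claim_ definition above) =====
theorem extract_target_name_spec : Claim_equal_extract_target_name := by
  intro user_input _
  unfold Spec_extract_target_name extract_target_name extract_target_name_alt
  simp only [pv_middle_eq]
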